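-- pv_equiv track=rewrite | github.com/bbislungo/VC-Snapshot | VC_Snapshot.py | sector_score
-- ===== SOURCE A (Python) =====
-- from typing import Dict, List, Optional
--
-- SECTOR_ALIASES = {
--     'DevTools': ['Developer Tools','Developer Platform','Developer Infrastructure'],
--     'Fintech': ['Fintech','Finance','Payments','Banking'],
--     'Consumer': ['Consumer Subscriptions','Consumer','B2C'],
-- }
--
-- def _norm(s: str) -> str:
--     return (s or '').strip().lower()
--
-- def sector_score(company_sector: str, vc_sectors: List[str]) -> (int, str):
--     cs = _norm(company_sector)
--     v = [_norm(x) for x in vc_sectors]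
--     if cs in v or 'any' in v:
--         return 100, "Sector matches VC focus"
--     for k, vals in SECTOR_ALIASES.items():
--         if cs in [_norm(x) for x in vals] and _norm(k) in v:
--             return 85, f"Sector close to {k}"
--     return 55, "Sector outside explicit focus"
-- ===== SOURCE B (Python) =====
-- from typing import Dict, List, Optional
--
-- SECTOR_ALIASES = {
--     'DevTools': ['Developer Tools','Developer Platform','Developer Infrastructure'],
--     'Fintech': ['Fintech','Finance','Payments','Banking'],
--     'Consumer': ['Consumer Subscriptions','Consumer','B2C'],
-- }
--
-- def _norm(s: str) -> str:
--     return (s or '').strip().lower()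
--
-- # Inverted index built once: normalized alias -> canonical sector key.
-- ALIAS_INDEX = {_norm(val): k for k, vals in SECTOR_ALIASES.items() for val in vals}
--
-- def sector_score(company_sector: str, vc_sectors: List[str]) -> (int, str):
--     cs = _norm(company_sector)
--     v = {_norm(x) for x in vc_sectors}
--     if cs in v or 'any' in v:
--         return 100, "Sector matches VC focus"
--     key = ALIAS_INDEX.get(cs)
--     if key is not None and _norm(key) in v:
--         return 85, f"Sector close to {key}"
--     return 55, "Sector outside explicit focus"
-- ===== Notes on version B (the rewrite author's own statement) =====
-- stated objective: idiomatic
-- what changed: Replaces the loop over SECTOR_ALIASES (which re-normalizes every alias list on every call) by a module-level inverted index ALIAS_INDEX mapping each normalized alias to its canonical key, so the alias match becomes a single dict lookup; VC sectors are held in a set.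
import Mathlib
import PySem

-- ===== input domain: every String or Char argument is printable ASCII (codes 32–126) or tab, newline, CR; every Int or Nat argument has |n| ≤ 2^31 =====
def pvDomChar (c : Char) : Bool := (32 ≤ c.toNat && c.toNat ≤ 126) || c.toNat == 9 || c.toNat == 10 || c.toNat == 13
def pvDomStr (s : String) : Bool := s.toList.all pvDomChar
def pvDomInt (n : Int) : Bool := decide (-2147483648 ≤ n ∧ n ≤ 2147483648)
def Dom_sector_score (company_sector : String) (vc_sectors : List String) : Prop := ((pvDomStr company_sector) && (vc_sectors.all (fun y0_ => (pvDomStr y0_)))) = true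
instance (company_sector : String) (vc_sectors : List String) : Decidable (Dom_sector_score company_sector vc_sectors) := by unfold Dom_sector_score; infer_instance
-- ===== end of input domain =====

-- B replaces A's per-call loop over SECTOR_ALIASES by a module-level inverted index
-- (normalized alias -> canonical key) consulted with a single dict lookup (idiomatic; not claimed faster).

-- ===== PORT A =====
-- _norm: '(s or "").strip().lower()' — for strings 's or ""' is the identity (strip of '' is ''), so strip then lower.
def pvNorm (s : String) : String := PySem.Str.lower (PySem.Str.strip s)

def pvSectorAliases : List (String × List String) :=
  [("DevTools", ["Developer Tools", "Developer Platform", "Developer Infrastructure"]),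
   ("Fintech", ["Fintech", "Finance", "Payments", "Banking"]),
   ("Consumer", ["Consumer Subscriptions", "Consumer", "B2C"])]

-- A's 'for k, vals in SECTOR_ALIASES.items(): …' with its early return
def pvLoopA (cs : String) (v : List String) : List (String × List String) → Int × String
  | [] => (55, "Sector outside explicit focus")
  | (k, vals) :: rest =>
    if cs ∈ vals.map pvNorm ∧ pvNorm k ∈ v then (85, "Sector close to " ++ k)
    else pvLoopA cs v rest

def sector_score (company_sector : String) (vc_sectors : List String) : Int × String :=
  let cs := pvNorm company_sector
  let v := vc_sectors.map pvNorm
  if cs ∈ v ∨ "any" ∈ v then (100, "Sector matches VC focus")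
  else pvLoopA cs v pvSectorAliases

-- ===== PORT B =====
-- ALIAS_INDEX = {_norm(val): k for k, vals in SECTOR_ALIASES.items() for val in vals}
def pvAliasIndex : PySem.Dict String String :=
  pvSectorAliases.foldl
    (fun d kv => kv.2.foldl (fun d val => d.insert (pvNorm val) kv.1) d) PySem.Dict.empty

def sector_score_alt (company_sector : String) (vc_sectors : List String) : Int × String :=
  let cs := pvNorm company_sector
  let v : PySem.Set String := PySem.Set.ofList (vc_sectors.map pvNorm)
  if cs ∈ v ∨ "any" ∈ v then (100, "Sector matches VC focus")
  else
    match pvAliasIndex.get? cs with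
    | some key => if pvNorm key ∈ v then (85, "Sector close to " ++ key)
                  else (55, "Sector outside explicit focus")
    | none => (55, "Sector outside explicit focus")

-- ===== PRECONDITION & SPEC =====
def Spec_sector_score (company_sector : String) (vc_sectors : List String) (out : Int × String) : Prop := out = sector_score_alt company_sector vc_sectors
instance (company_sector : String) (vc_sectors : List String) (out : Int × String) : Decidable (Spec_sector_score company_sector vc_sectors out) := by unfold Spec_sector_score; infer_instance

-- ===== CLAIM (what is proved, stated in full; the proofs are below) =====
def Claim_equal_sector_score : Prop := ∀ (company_sector : String) (vc_sectors : List String), Dom_sector_score company_sector vc_sectors → Spec_sector_score company_sector vc_sectors (sector_score company_sector vc_sectors)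

-- ===== LEMMAS AND PROOFS =====
theorem pvAliasIndex_eq : pvAliasIndex = PySem.Dict.mk
    [("developer tools", "DevTools"), ("developer platform", "DevTools"),
     ("developer infrastructure", "DevTools"),
     ("fintech", "Fintech"), ("finance", "Fintech"), ("payments", "Fintech"),
     ("banking", "Fintech"),
     ("consumer subscriptions", "Consumer"), ("consumer", "Consumer"),
     ("b2c", "Consumer")] := by decide

theorem pvLoop_eq_lookup (cs : String) (v : List String) :
    pvLoopA cs v pvSectorAliases =
      match pvAliasIndex.get? cs with
      | some key => if pvNorm key ∈ v then ((85 : Int), "Sector close to " ++ key)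
                    else ((55 : Int), "Sector outside explicit focus")
      | none => ((55 : Int), "Sector outside explicit focus") := by
  rw [pvAliasIndex_eq]
  have h1 : pvNorm "DevTools" = "devtools" := by decide
  have h2 : pvNorm "Fintech" = "fintech" := by decide
  have h3 : pvNorm "Consumer" = "consumer" := by decide
  have e1 : pvNorm "Developer Tools" = "developer tools" := by decide
  have e2 : pvNorm "Developer Platform" = "developer platform" := by decide
  have e3 : pvNorm "Developer Infrastructure" = "developer infrastructure" := by decide
  have e5 : pvNorm "Finance" = "finance" := by decide
  have e6 : pvNorm "Payments" = "payments" := by decide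
  have e7 : pvNorm "Banking" = "banking" := by decide
  have e8 : pvNorm "Consumer Subscriptions" = "consumer subscriptions" := by decide
  have e10 : pvNorm "B2C" = "b2c" := by decide
  simp only [pvSectorAliases, pvLoopA, List.map, h1, h2, h3, e1, e2, e3, e5, e6, e7, e8, e10, PySem.Dict.get?_mk_cons, List.mem_cons, List.not_mem_nil, or_false,
    beq_iff_eq]
  by_cases c1 : cs = "developer tools"
  · simp [h1, c1]
  by_cases c2 : cs = "developer platform"
  · simp [h1, c2]
  by_cases c3 : cs = "developer infrastructure"
  · simp [h1, c3]
  by_cases c4 : cs = "fintech"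
  · simp [h2, c4]
  by_cases c5 : cs = "finance"
  · simp [h2, c5]
  by_cases c6 : cs = "payments"
  · simp [h2, c6]
  by_cases c7 : cs = "banking"
  · simp [h2, c7]
  by_cases c8 : cs = "consumer subscriptions"
  · simp [h3, c8]
  by_cases c9 : cs = "consumer"
  · simp [h3, c9]
  by_cases c10 : cs = "b2c"
  · simp [h3, c10]
  simp [eq_comm, c1, c2, c3, c4, c5, c6, c7, c8, c9, c10, PySem.Dict.get?]
-- ===== VERDICT (by name: the statement is the Claim_ definition above) =====
theorem sector_score_spec : Claim_equal_sector_score := by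
  intro csRaw vs _
  unfold Spec_sector_score sector_score sector_score_alt
  simp only [PySem.Set.mem_ofList]
  rw [pvLoop_eq_lookup]
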